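-- pv_equiv track=rewrite | github.com/fancyzzy/compare | listdir.py | refine_data
-- ===== SOURCE A (Python) =====
-- def refine_data(data):
-- 	flag = 0
-- 	for i in range(len(data)):
-- 		if data[i] == '{':
-- 			flag += 1
-- 		elif data[i] == '}':
-- 			flag -= 1
--
-- 		if data[i] == ' ' and flag == 0:
-- 			#print "DEBUG data[:i-1]",data[:i]
-- 			data = data[:i] + "," + data[i+1:]
-- 	l = data.split(',')
-- 	return l
-- ===== SOURCE B (Python) =====
-- def refine_data(data):
--     flag = 0
--     result = []
--     buf = []
--     for c in data:
--         if c == '{':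
--             flag += 1
--         elif c == '}':
--             flag -= 1
--         if c == ',' or (c == ' ' and flag == 0):
--             result.append(''.join(buf))
--             buf = []
--         else:
--             buf.append(c)
--     result.append(''.join(buf))
--     return result
-- ===== Notes on version B (the rewrite author's own statement) =====
-- stated objective: simpler
-- what changed: B is a single-pass tokenizer with a depth counter and a character buffer that emits tokens directly, instead of A's rebuild-the-string-by-slicing at every depth-0 space followed by a separate comma-split pass.
import Mathlib
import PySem

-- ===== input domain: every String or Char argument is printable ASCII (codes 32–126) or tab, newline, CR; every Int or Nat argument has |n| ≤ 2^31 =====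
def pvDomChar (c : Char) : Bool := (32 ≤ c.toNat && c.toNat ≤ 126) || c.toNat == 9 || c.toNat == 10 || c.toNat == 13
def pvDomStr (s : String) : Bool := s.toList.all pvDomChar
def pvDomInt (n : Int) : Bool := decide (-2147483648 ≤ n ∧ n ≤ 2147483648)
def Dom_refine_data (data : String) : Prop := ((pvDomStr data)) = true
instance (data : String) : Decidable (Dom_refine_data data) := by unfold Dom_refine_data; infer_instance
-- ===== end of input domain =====

-- B is a single-pass tokenizer (depth counter + token buffer) instead of A's
-- rebuild-the-string-then-split; objective: simpler/alternative, same result.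

-- ===== PORT A =====
-- A's loop: for i in range(len(data)) over a string it mutates in place
-- (replacement keeps the length, so range(len(data)) is fixed up front).
-- data[i] with 0 ≤ i < len is exact as List.getD i; data[:i] + "," + data[i+1:]
-- is ported with PySem.List.slice.
def refine_data (data : String) : List String :=
  let st := (List.range data.toList.length).foldl
    (fun (st : List Char × Int) i =>
      let c := st.1.getD i ' '
      let flag := if c = '{' then st.2 + 1 else if c = '}' then st.2 - 1 else st.2
      let d := if c = ' ' ∧ flag = 0 then
          PySem.List.slice st.1 none (some (i : Int)) ++ [','] ++
            PySem.List.slice st.1 (some ((i : Int) + 1)) none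
        else st.1
      (d, flag))
    (data.toList, 0)
  -- data.split(',') : separator non-empty, Python never raises here
  (PySem.Chars.splitOn st.1 [',']).map String.ofList

-- ===== PORT B =====
def refine_data_alt (data : String) : List String :=
  let st := data.toList.foldl
    (fun (st : List String × List Char × Int) c =>
      let flag := if c = '{' then st.2.2 + 1 else if c = '}' then st.2.2 - 1 else st.2.2
      if c = ',' ∨ (c = ' ' ∧ flag = 0) then (st.1 ++ [String.ofList st.2.1], [], flag)
      else (st.1, st.2.1 ++ [c], flag))
    ([], [], 0)
  st.1 ++ [String.ofList st.2.1]

-- ===== PRECONDITION & SPEC =====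
def Spec_refine_data (data : String) (out : List String) : Prop := out = refine_data_alt data
instance (data : String) (out : List String) : Decidable (Spec_refine_data data out) := by unfold Spec_refine_data; infer_instance

-- ===== CLAIM (what is proved, stated in full; the proofs are below) =====
def Claim_equal_refine_data : Prop := ∀ (data : String), Dom_refine_data data → Spec_refine_data data (refine_data data)

-- ===== LEMMAS AND PROOFS =====

-- Flag update per character.
def updFlag (flag : Int) (c : Char) : Int :=
  if c = '{' then flag + 1 else if c = '}' then flag - 1 else flag

-- The transformed string: a depth-0 space becomes ','; everything else stays.
def tr (flag : Int) : List Char → List Char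
  | [] => []
  | c :: cs =>
      (if c = ' ' ∧ updFlag flag c = 0 then ',' else c) :: tr (updFlag flag c) cs

-- Splitting a char list on ',' with a pending prefix token.
def splitC (pre : List Char) : List Char → List (List Char)
  | [] => [pre]
  | c :: cs => if c = ',' then pre :: splitC [] cs else splitC (pre ++ [c]) cs

-- A's loop, started with `pre` already processed, rewrites the suffix by `tr`.
theorem A_loop (suf : List Char) : ∀ (pre : List Char) (flag : Int),
    ((List.range' pre.length suf.length).foldl
      (fun (st : List Char × Int) i =>
        let c := st.1.getD i ' '
        let flag := if c = '{' then st.2 + 1 else if c = '}' then st.2 - 1 else st.2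
        let d := if c = ' ' ∧ flag = 0 then
            PySem.List.slice st.1 none (some (i : Int)) ++ [','] ++
              PySem.List.slice st.1 (some ((i : Int) + 1)) none
          else st.1
        (d, flag))
      (pre ++ suf, flag)).1 = pre ++ tr flag suf := by
  induction suf with
  | nil => intro pre flag; simp [tr]
  | cons c rest ih =>
    intro pre flag
    rw [List.length_cons, List.range'_succ, List.foldl_cons]
    have hget : (pre ++ c :: rest).getD pre.length ' ' = c := by
      simp [List.getD_eq_getElem?_getD]
    have hsl1 : PySem.List.slice (pre ++ c :: rest) none (some (pre.length : Int))
        = pre := by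
      rw [PySem.List.slice_to _ (by positivity)]
      simp
    have hsl2 : PySem.List.slice (pre ++ c :: rest) (some ((pre.length : Int) + 1)) none
        = rest := by
      rw [PySem.List.slice_from _ (by positivity)]
      have h1 : ((pre.length : Int) + 1).toNat = pre.length + 1 := by omega
      have h2 : pre ++ c :: rest = (pre ++ [c]) ++ rest := by simp
      rw [h1, h2, List.drop_left' (by simp)]
    simp only [hget, hsl1, hsl2]
    set f := updFlag flag c with hf
    have hflag : (if c = '{' then flag + 1 else if c = '}' then flag - 1 else flag) = f := rfl
    by_cases hc : c = ' ' ∧ f = 0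
    · have hne : ¬ c = '{' := by rintro rfl; exact absurd hc.1 (by decide)
      have hne2 : ¬ c = '}' := by rintro rfl; exact absurd hc.1 (by decide)
      simp only [hne, hne2, if_false] at hflag ⊢
      rw [if_pos (by rw [hflag]; exact hc)]
      have h2 := ih (pre ++ [',']) f
      rw [show (pre ++ [',']).length = pre.length + 1 from by simp] at h2
      dsimp only at h2
      rw [hflag, h2]
      obtain ⟨hc1, hc2⟩ := hc
      subst hc1
      simp [tr, updFlag, hc2]
    · rw [hflag, if_neg hc]
      have h2 := ih (pre ++ [c]) f
      rw [show (pre ++ [c]).length = pre.length + 1 from by simp] at h2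
      dsimp only at h2
      rw [show pre ++ c :: rest = pre ++ [c] ++ rest from by simp, h2]
      have htr : tr flag (c :: rest) = c :: tr f rest := by
        simp [tr, ← hf]
        intro h1 h2
        exact absurd ⟨h1, h2⟩ hc
      rw [htr]
      simp

-- splitOn with separator "," is splitC (fuel is always sufficient).
theorem splitOn_go_comma (l : List Char) : ∀ (fuel : Nat) (cur : List Char)
    (acc : List (List Char)), l.length < fuel →
    PySem.Chars.splitOn.go [','] fuel l cur acc
      = acc.reverse ++ splitC cur.reverse l := by
  induction l with
  | nil =>
    intro fuel cur acc h
    match fuel with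
    | fuel + 1 => simp [PySem.Chars.splitOn.go, splitC]
  | cons c rest ih =>
    intro fuel cur acc h
    match fuel with
    | fuel + 1 =>
      rw [PySem.Chars.splitOn.go]
      by_cases hc : c = ','
      · subst hc
        rw [if_pos (by simp [List.isPrefixOf])]
        simp only [List.length_cons, List.length_nil, List.drop_succ_cons, List.drop_zero]
        rw [ih fuel [] (cur.reverse :: acc) (by simpa using Nat.lt_of_succ_lt_succ h)]
        simp [splitC]
      · rw [if_neg (by simp [List.isPrefixOf]; intro h'; exact absurd h'.symm hc)]
        rw [ih fuel (c :: cur) acc (by simpa using Nat.lt_of_succ_lt_succ h)]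
        simp [splitC, hc]

theorem splitOn_comma (l : List Char) :
    PySem.Chars.splitOn l [','] = splitC [] l := by
  rw [PySem.Chars.splitOn]
  rw [splitOn_go_comma l (l.length + 1) [] [] (Nat.lt_succ_self _)]
  simp

-- B's loop tokenizes exactly like splitting the transformed string.
theorem B_loop (cs : List Char) : ∀ (res : List String) (buf : List Char) (flag : Int),
    (let st := cs.foldl
      (fun (st : List String × List Char × Int) c =>
        let flag := if c = '{' then st.2.2 + 1 else if c = '}' then st.2.2 - 1 else st.2.2
        if c = ',' ∨ (c = ' ' ∧ flag = 0) then (st.1 ++ [String.ofList st.2.1], [], flag)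
        else (st.1, st.2.1 ++ [c], flag))
      (res, buf, flag)
     st.1 ++ [String.ofList st.2.1])
      = res ++ (splitC buf (tr flag cs)).map String.ofList := by
  induction cs with
  | nil => intro res buf flag; simp [tr, splitC]
  | cons c rest ih =>
    intro res buf flag
    rw [List.foldl_cons]
    set f := updFlag flag c with hf
    have hflag : (if c = '{' then flag + 1 else if c = '}' then flag - 1 else flag) = f := rfl
    simp only [hflag]
    by_cases hd : c = ',' ∨ (c = ' ' ∧ f = 0)
    · rw [if_pos hd]
      have hch : (if c = ' ' ∧ f = 0 then ',' else c) = ',' := by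
        rcases hd with h | h
        · by_cases h2 : c = ' ' ∧ f = 0 <;> simp [h, h2]
        · simp [h]
      rw [ih (res ++ [String.ofList buf]) [] f]
      simp [tr, ← hf, hch, splitC]
    · rw [if_neg hd]
      rw [not_or, not_and] at hd
      have hch : (if c = ' ' ∧ f = 0 then ',' else c) = c := by
        rw [if_neg]; rintro ⟨h1, h2⟩; exact absurd h2 (hd.2 h1)
      rw [ih res (buf ++ [c]) f]
      simp only [tr, ← hf, hch, splitC]
      rw [if_neg hd.1]

-- ===== VERDICT (by name: the statement is the Claim_ definition above) =====
theorem refine_data_spec : Claim_equal_refine_data := by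
  intro data _
  unfold Spec_refine_data
  simp only [refine_data, refine_data_alt, List.range_eq_range']
  have hA := A_loop data.toList [] 0
  simp only [List.nil_append, List.length_nil] at hA
  rw [hA, splitOn_comma]
  have hB := B_loop data.toList [] [] 0
  simp only [List.nil_append] at hB
  rw [hB]
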